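-- pv_equiv track=rewrite | github.com/ab-jiteshlalwani/EOS | eos_api/quantum_optimize_eos/views/quantum_optimize_view.py | separate_gs_and_fix_non_gs_targets
-- ===== SOURCE A (Python) =====
-- def correct(lst):
--     for i in range(int(len(lst) / 2)):
--         lst = add_negative_pairs(lst)
--     return lst
--
-- def separate_gs_and_fix_non_gs_targets(s):
--     if s[-1] > 0:
--         t = []
--         for element in reversed(s):
--             if element < 0:
--                 break
--             t.append(element)
--
--         s = t[::-1] + s
--
--     s = correct(s)
--     s_, temp, gs_ = [], [], []
--     for i in s:
--         if i < 0:
--             gs_.append(i)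
--             s_.append(temp)
--             temp = []
--         else:
--             temp.append(i)
--
--     if not s_[0]:
--         s_ = s_[1:]
--         gs_ = gs_[1:]
--
--     return s_, gs_
--
-- def add_negative_pairs(lst):
--     # base case: if the list is empty, return an empty list
--     if not lst:
--         return []
--
--     # if the first element is positive, keep it and recurse on the rest of the list
--     if lst[0] >= 0:
--         return [lst[0]] + add_negative_pairs(lst[1:])
--
--     # if the first two elements are negative, add them and recurse on the rest of the list
--     if len(lst) > 1 and lst[1] < 0:
--         return [lst[0] + lst[1]] + add_negative_pairs(lst[2:])
--
--     # if the first element is negative and the second is positive, keep the negative element and recurse on the rest of the list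
--     return [lst[0]] + add_negative_pairs(lst[1:])
-- ===== SOURCE B (Python) =====
-- def separate_gs_and_fix_non_gs_targets(s):
--     # Rotation step: if the list ends positive, the trailing non-negative run
--     # is copied to the front (as in A); count it from the right instead of
--     # collecting and reversing a list.
--     if s[-1] > 0:
--         t = 0
--         for x in reversed(s):
--             if x < 0:
--                 break
--             t += 1
--         s = s[len(s) - t:] + s
--     # Single pass: each maximal run of negatives is summed into one value
--     # (groups gets the preceding non-negative group when a run starts,
--     # sums gets the run total when it ends); trailing non-negatives drop.
--     groups, sums, cur, run = [], [], [], None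
--     for x in s:
--         if x < 0:
--             if run is None:
--                 groups.append(cur)
--                 cur = []
--                 run = x
--             else:
--                 run += x
--         else:
--             if run is not None:
--                 sums.append(run)
--                 run = None
--             cur.append(x)
--     if run is not None:
--         sums.append(run)
--     if not groups[0]:
--         groups, sums = groups[1:], sums[1:]
--     return groups, sums
-- ===== Notes on version B (the rewrite author's own statement) =====
-- stated objective: faster
-- what changed: A repeatedly re-scans the whole list with a recursive pair-merging pass (floor(n/2) passes, each rebuilding the list by slicing) and then partitions; B sums each maximal negative run and builds the partition in one single linear pass with a run accumulator.
-- intended difference: On all-negative lists of length 3 or 5, floor(n/2) pair-merging passes are too few to collapse the single run, so A returns ([[]], [r]) with r only a partial run sum, while B returns ([], []) with the whole run summed and the resulting leading empty group dropped, which is the intended full collapse the loop in correct() aims for. — e.g. on separate_gs_and_fix_non_gs_targets([-1, -1, -1]): A returns ([[]], [-1]), B returns ([], [])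
import Mathlib
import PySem

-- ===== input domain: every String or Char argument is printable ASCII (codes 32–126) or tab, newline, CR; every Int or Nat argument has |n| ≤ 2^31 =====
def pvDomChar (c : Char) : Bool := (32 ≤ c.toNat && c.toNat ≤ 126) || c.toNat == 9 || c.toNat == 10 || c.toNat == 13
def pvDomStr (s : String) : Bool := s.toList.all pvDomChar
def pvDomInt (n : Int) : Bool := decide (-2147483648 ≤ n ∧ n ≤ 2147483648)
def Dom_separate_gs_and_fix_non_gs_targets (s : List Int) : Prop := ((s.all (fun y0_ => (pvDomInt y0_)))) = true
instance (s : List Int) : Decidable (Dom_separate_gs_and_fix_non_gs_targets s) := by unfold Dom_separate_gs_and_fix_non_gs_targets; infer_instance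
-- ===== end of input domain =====

-- B replaces A's repeated recursive pair-merging passes and separate partition loop by one
-- linear pass that sums each maximal negative run (objective: faster, asymptotic); on
-- all-negative lists of length 3 or 5 A's floor(n/2) passes under-collapse the run (see D_).


-- ===== PORT A =====
-- add_negative_pairs: one recursive pass merging adjacent negative pairs
def addNegPairs : List Int → List Int
  | [] => []
  | x :: rest =>
    if 0 ≤ x then x :: addNegPairs rest
    else
      match rest with
      | y :: rest2 =>
        if y < 0 then (x + y) :: addNegPairs rest2
        else x :: addNegPairs (y :: rest2)
      | [] => x :: addNegPairs []   -- [lst[0]] + add_negative_pairs(lst[1:]) with lst[1:] = []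

-- correct: lst = add_negative_pairs(lst), repeated int(len(lst)/2) times (range fixed up front)
def correctA (lst : List Int) : List Int :=
  (List.range (lst.length / 2)).foldl (fun l _ => addNegPairs l) lst

-- the 'for element in reversed(s): if element < 0: break; t.append(element)' loop
def takeNonnegA : List Int → List Int
  | [] => []
  | x :: r => if x < 0 then [] else x :: takeNonnegA r

-- body of A's partition loop, state (s_, temp, gs_)
def partStepA (st : List (List Int) × List Int × List Int) (i : Int) :
    List (List Int) × List Int × List Int :=
  let (s_, temp, gs_) := st
  if i < 0 then (s_ ++ [temp], ([] : List Int), gs_ ++ [i])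
  else (s_, temp ++ [i], gs_)

def separate_gs_and_fix_non_gs_targets (s : List Int) : List (List Int) × List Int :=
  let s1 :=
    match PySem.List.pyGet? s (-1) with        -- s[-1]
    | some last =>
      if 0 < last then (takeNonnegA s.reverse).reverse ++ s   -- t[::-1] + s
      else s
    | none => s                                 -- IndexError (s = []); excluded by Pre_
  let s2 := correctA s1
  let st := s2.foldl partStepA ([], [], [])
  let s_ := st.1
  let gs_ := st.2.2
  match PySem.List.pyGet? s_ 0 with             -- s_[0]
  | some g => if g = [] then (s_.drop 1, gs_.drop 1) else (s_, gs_)  -- s_[1:], gs_[1:]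
  | none => (s_, gs_)                           -- IndexError; excluded by Pre_

-- ===== PORT B =====
-- the counting loop 'for x in reversed(s): if x < 0: break; t += 1'
def countNonnegB : List Int → Nat
  | [] => 0
  | x :: r => if x < 0 then 0 else countNonnegB r + 1

-- body of B's single pass, state (groups, sums, cur, run)
def stepB (st : List (List Int) × List Int × List Int × Option Int) (x : Int) :
    List (List Int) × List Int × List Int × Option Int :=
  let (gs, ss, cur, run) := st
  if x < 0 then
    match run with
    | none => (gs ++ [cur], ss, ([] : List Int), some x)
    | some v => (gs, ss, cur, some (v + x))
  else
    match run with
    | some v => (gs, ss ++ [v], cur ++ [x], none)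
    | none => (gs, ss, cur ++ [x], none)

def separate_gs_and_fix_non_gs_targets_alt (s : List Int) : List (List Int) × List Int :=
  let s1 :=
    match PySem.List.pyGet? s (-1) with         -- s[-1]
    | some last =>
      if 0 < last then s.drop (s.length - countNonnegB s.reverse) ++ s  -- s[len(s)-t:] + s
      else s
    | none => s                                 -- IndexError (s = []); excluded by Pre_
  let st := s1.foldl stepB ([], [], [], none)
  let gs := st.1
  let ss := match st.2.2.2 with                 -- 'if run is not None: sums.append(run)'
    | some v => st.2.1 ++ [v]
    | none => st.2.1
  match PySem.List.pyGet? gs 0 with             -- groups[0]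
  | some g => if g = [] then (gs.drop 1, ss.drop 1) else (gs, ss)  -- groups[1:], sums[1:]
  | none => (gs, ss)                            -- IndexError; excluded by Pre_

-- ===== PRECONDITION & SPEC =====
-- Pre_ excludes exactly the inputs on which Python A raises IndexError: the empty list
-- (at s[-1]) and lists without any negative element (at s_[0]).
def Pre_separate_gs_and_fix_non_gs_targets (s : List Int) : Prop :=
  s ≠ [] ∧ ∃ x ∈ s, x < 0
instance (s : List Int) : Decidable (Pre_separate_gs_and_fix_non_gs_targets s) := by
  unfold Pre_separate_gs_and_fix_non_gs_targets; infer_instance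
def pvWitness_separate_gs_and_fix_non_gs_targets : List Int := [1, -2, 3]

-- On all-negative lists of length 3 or 5, floor(n/2) pair-merging passes are too few to
-- collapse the single run, so A returns ([[]], [r]) with r only a partial run sum, while B
-- returns ([], []) with the whole run summed and the resulting leading empty group dropped,
-- which is the intended full collapse the loop in correct() aims for.
def D_separate_gs_and_fix_non_gs_targets (s : List Int) : Prop :=
  (s.length = 3 ∨ s.length = 5) ∧ ∀ x ∈ s, x < 0
instance (s : List Int) : Decidable (D_separate_gs_and_fix_non_gs_targets s) := by
  unfold D_separate_gs_and_fix_non_gs_targets; infer_instance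

def Spec_separate_gs_and_fix_non_gs_targets (s : List Int) (out : List (List Int) × List Int) : Prop :=
  ¬ D_separate_gs_and_fix_non_gs_targets s → out = separate_gs_and_fix_non_gs_targets_alt s
instance (s : List Int) (out : List (List Int) × List Int) :
    Decidable (Spec_separate_gs_and_fix_non_gs_targets s out) := by
  unfold Spec_separate_gs_and_fix_non_gs_targets; infer_instance

def pvDiffWitness_separate_gs_and_fix_non_gs_targets : List Int := [-1, -1, -1]
def pvDiffWitnessOut_separate_gs_and_fix_non_gs_targets :
    (List (List Int) × List Int) × (List (List Int) × List Int) :=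
  (([[]], [-1]), ([], []))

-- ===== CLAIM =====
def Claim_unchanged_separate_gs_and_fix_non_gs_targets : Prop :=
  ∀ (s : List Int), Dom_separate_gs_and_fix_non_gs_targets s →
    Pre_separate_gs_and_fix_non_gs_targets s →
    Spec_separate_gs_and_fix_non_gs_targets s (separate_gs_and_fix_non_gs_targets s)
def Claim_changed_separate_gs_and_fix_non_gs_targets : Prop :=
  Dom_separate_gs_and_fix_non_gs_targets (pvDiffWitness_separate_gs_and_fix_non_gs_targets) ∧
  Pre_separate_gs_and_fix_non_gs_targets (pvDiffWitness_separate_gs_and_fix_non_gs_targets) ∧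
  D_separate_gs_and_fix_non_gs_targets (pvDiffWitness_separate_gs_and_fix_non_gs_targets) ∧
  separate_gs_and_fix_non_gs_targets (pvDiffWitness_separate_gs_and_fix_non_gs_targets) =
    pvDiffWitnessOut_separate_gs_and_fix_non_gs_targets.1 ∧
  separate_gs_and_fix_non_gs_targets_alt (pvDiffWitness_separate_gs_and_fix_non_gs_targets) =
    pvDiffWitnessOut_separate_gs_and_fix_non_gs_targets.2 ∧
  pvDiffWitnessOut_separate_gs_and_fix_non_gs_targets.1 ≠
    pvDiffWitnessOut_separate_gs_and_fix_non_gs_targets.2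
def Claim_exact_separate_gs_and_fix_non_gs_targets : Prop :=
  ∀ (s : List Int), Dom_separate_gs_and_fix_non_gs_targets s →
    Pre_separate_gs_and_fix_non_gs_targets s →
    D_separate_gs_and_fix_non_gs_targets s →
    separate_gs_and_fix_non_gs_targets s ≠ separate_gs_and_fix_non_gs_targets_alt s

-- ===== LEMMAS AND PROOFS =====

-- leading-negative-run length / sum / remainder of a list
def negLen : List Int → Nat
  | [] => 0
  | x :: r => if x < 0 then negLen r + 1 else 0

def negSum : List Int → Int
  | [] => 0
  | x :: r => if x < 0 then x + negSum r else 0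

def negDrop : List Int → List Int
  | [] => []
  | x :: r => if x < 0 then negDrop r else x :: r

theorem negDrop_length_le (l : List Int) : (negDrop l).length ≤ l.length := by
  induction l with
  | nil => simp [negDrop]
  | cons x r ih => simp only [negDrop]; split <;> simp <;> omega

-- full collapse: every maximal negative run summed into one element
def norm : List Int → List Int
  | [] => []
  | x :: r =>
    if x < 0 then (x + negSum r) :: norm (negDrop r)
    else x :: norm r
termination_by l => l.length
decreasing_by
  · exact Nat.lt_succ_of_le (negDrop_length_le r)
  · simp

-- maximal negative-run length
def maxRun : List Int → Nat
  | [] => 0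
  | x :: r =>
    if x < 0 then max (negLen r + 1) (maxRun (negDrop r))
    else maxRun r
termination_by l => l.length
decreasing_by
  · exact Nat.lt_succ_of_le (negDrop_length_le r)
  · simp


theorem addNegPairs_nil : addNegPairs [] = [] := by rw [addNegPairs.eq_def]
theorem addNegPairs_cons_nonneg {x : Int} {rest : List Int} (hx : 0 ≤ x) :
    addNegPairs (x :: rest) = x :: addNegPairs rest := by
  rw [addNegPairs.eq_def]; simp only [if_pos hx]
theorem addNegPairs_cons2_neg {x y : Int} {rest2 : List Int} (hx : ¬ 0 ≤ x) (hy : y < 0) :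
    addNegPairs (x :: y :: rest2) = (x + y) :: addNegPairs rest2 := by
  rw [addNegPairs.eq_def]; simp only [if_neg hx, if_pos hy]
theorem addNegPairs_cons2_nonneg {x y : Int} {rest2 : List Int} (hx : ¬ 0 ≤ x) (hy : ¬ y < 0) :
    addNegPairs (x :: y :: rest2) = x :: addNegPairs (y :: rest2) := by
  rw [addNegPairs.eq_def]; simp only [if_neg hx, if_neg hy]
theorem addNegPairs_single {x : Int} (hx : ¬ 0 ≤ x) : addNegPairs [x] = [x] := by
  rw [addNegPairs.eq_def]; simp only [if_neg hx]; rw [addNegPairs_nil]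
theorem negDrop_cons_neg {x : Int} {r : List Int} (h : x < 0) : negDrop (x :: r) = negDrop r := by
  simp [negDrop, h]
theorem negDrop_cons_nonneg {x : Int} {r : List Int} (h : ¬ x < 0) : negDrop (x :: r) = x :: r := by
  simp [negDrop, h]
theorem negSum_cons_neg {x : Int} {r : List Int} (h : x < 0) : negSum (x :: r) = x + negSum r := by
  simp [negSum, h]
theorem negSum_cons_nonneg {x : Int} {r : List Int} (h : ¬ x < 0) : negSum (x :: r) = 0 := by
  simp [negSum, h]
theorem negLen_cons_neg {x : Int} {r : List Int} (h : x < 0) : negLen (x :: r) = negLen r + 1 := by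
  simp [negLen, h]
theorem negLen_cons_nonneg {x : Int} {r : List Int} (h : ¬ x < 0) : negLen (x :: r) = 0 := by
  simp [negLen, h]

theorem norm_nil : norm [] = [] := by rw [norm.eq_def]
theorem norm_cons_neg {x : Int} {r : List Int} (h : x < 0) :
    norm (x :: r) = (x + negSum r) :: norm (negDrop r) := by rw [norm.eq_def]; simp [h]
theorem norm_cons_nonneg {x : Int} {r : List Int} (h : ¬ x < 0) :
    norm (x :: r) = x :: norm r := by rw [norm.eq_def]; simp [h]
theorem maxRun_nil : maxRun [] = 0 := by rw [maxRun.eq_def]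
theorem maxRun_cons_neg {x : Int} {r : List Int} (h : x < 0) :
    maxRun (x :: r) = max (negLen r + 1) (maxRun (negDrop r)) := by rw [maxRun.eq_def]; simp [h]
theorem maxRun_cons_nonneg {x : Int} {r : List Int} (h : ¬ x < 0) :
    maxRun (x :: r) = maxRun r := by rw [maxRun.eq_def]; simp [h]

theorem negLen_addNegPairs (l : List Int) : negLen (addNegPairs l) = (negLen l + 1) / 2 := by
  induction l using addNegPairs.induct with
  | case1 => rw [addNegPairs.eq_def]; simp [negLen]
  | case2 x rest hx ih => rw [addNegPairs.eq_def]; simp [negLen, hx, not_lt.mpr hx]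
  | case3 x hx y rest2 hy ih =>
      rw [addNegPairs.eq_def]
      simp only [if_neg hx, if_pos hy]
      simp [negLen, hy, show x + y < 0 by omega, show x < 0 by omega]
      omega
  | case4 x hx y rest2 hy ih =>
      rw [addNegPairs.eq_def]
      simp only [if_neg hx]
      simp [negLen, hy, show x < 0 by omega] at *
      omega
  | case5 x hx ih =>
      rw [addNegPairs.eq_def]
      simp [negLen, show x < 0 by omega, addNegPairs]

theorem negSum_addNegPairs (l : List Int) : negSum (addNegPairs l) = negSum l := by
  induction l using addNegPairs.induct with
  | case1 => rw [addNegPairs.eq_def]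
  | case2 x rest hx ih =>
      rw [addNegPairs.eq_def]; simp only [if_pos hx]; simp [negSum, not_lt.mpr hx]
  | case3 x hx y rest2 hy ih =>
      rw [addNegPairs.eq_def]
      simp only [if_neg hx, if_pos hy]
      simp [negSum, hy, show x + y < 0 by omega, show x < 0 by omega, ih]
      ring
  | case4 x hx y rest2 hy ih =>
      rw [addNegPairs.eq_def]
      simp only [if_neg hx, if_neg hy]
      simp [negSum, show x < 0 by omega, ih]
  | case5 x hx ih =>
      rw [addNegPairs.eq_def]
      simp [negSum, show x < 0 by omega, addNegPairs]

theorem negDrop_addNegPairs (l : List Int) : negDrop (addNegPairs l) = addNegPairs (negDrop l) := by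
  induction l using addNegPairs.induct with
  | case1 => rw [addNegPairs_nil]; rfl
  | case2 x rest hx ih =>
      rw [addNegPairs_cons_nonneg hx,
          negDrop_cons_nonneg (not_lt.mpr hx), negDrop_cons_nonneg (not_lt.mpr hx),
          addNegPairs_cons_nonneg hx]
  | case3 x hx y rest2 hy ih =>
      rw [addNegPairs_cons2_neg hx hy,
          negDrop_cons_neg (by omega), negDrop_cons_neg (by omega : x < 0),
          negDrop_cons_neg hy, ih]
  | case4 x hx y rest2 hy ih =>
      rw [addNegPairs_cons2_nonneg hx hy,
          addNegPairs_cons_nonneg (not_lt.mp hy),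
          negDrop_cons_neg (by omega : x < 0), negDrop_cons_nonneg hy,
          negDrop_cons_neg (by omega : x < 0), negDrop_cons_nonneg hy,
          addNegPairs_cons_nonneg (not_lt.mp hy)]
  | case5 x hx ih =>
      rw [addNegPairs_single hx, negDrop_cons_neg (by omega : x < 0)]
      simp [negDrop, addNegPairs_nil]

theorem negLen_zero_negSum {r : List Int} (h : negLen r = 0) : negSum r = 0 := by
  cases r with
  | nil => rfl
  | cons x r' =>
      by_cases hx : x < 0
      · rw [negLen_cons_neg hx] at h; omega
      · rw [negSum_cons_nonneg hx]

theorem negLen_zero_negDrop {r : List Int} (h : negLen r = 0) : negDrop r = r := by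
  cases r with
  | nil => rfl
  | cons x r' =>
      by_cases hx : x < 0
      · rw [negLen_cons_neg hx] at h; omega
      · rw [negDrop_cons_nonneg hx]

theorem norm_addNegPairs (l : List Int) : norm (addNegPairs l) = norm l := by
  have H : ∀ (n : Nat) (l : List Int), l.length ≤ n → norm (addNegPairs l) = norm l := by
    intro n
    induction n with
    | zero =>
        intro l hl
        have : l = [] := by cases l <;> simp_all
        subst this; rw [addNegPairs.eq_def]
    | succ n ih =>
        intro l hl
        match l with
        | [] => rw [addNegPairs.eq_def]
        | x :: rest =>
          by_cases hx : 0 ≤ x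
          · rw [addNegPairs.eq_def]; simp only [if_pos hx]
            rw [norm_cons_nonneg (not_lt.mpr hx), norm_cons_nonneg (not_lt.mpr hx)]
            have := ih rest (by simp at hl; omega)
            rw [this]
          · match rest with
            | [] =>
                rw [addNegPairs.eq_def]; simp only [if_neg hx]
                rw [addNegPairs_nil]
            | y :: rest2 =>
              by_cases hy : y < 0
              · rw [addNegPairs.eq_def]; simp only [if_neg hx, if_pos hy]
                rw [norm_cons_neg (by omega), norm_cons_neg (by omega : x < 0)]
                rw [negSum_addNegPairs, negDrop_addNegPairs]
                have := ih (negDrop rest2)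
                  (le_trans (negDrop_length_le rest2) (by simp at hl; omega))
                rw [this]
                simp [negSum, negDrop, hy]
                ring_nf
              · rw [addNegPairs.eq_def]; simp only [if_neg hx, if_neg hy]
                rw [norm_cons_neg (by omega : x < 0), norm_cons_neg (by omega : x < 0)]
                rw [negSum_addNegPairs]
                have h1 : addNegPairs (y :: rest2) = y :: addNegPairs rest2 := by
                  rw [addNegPairs.eq_def]; simp only [if_pos (not_lt.mp hy)]
                rw [h1, negDrop_cons_nonneg hy, negDrop_cons_nonneg hy,
                    norm_cons_nonneg hy, norm_cons_nonneg hy]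
                have := ih rest2 (by simp at hl; omega)
                rw [this]
  exact H l.length l le_rfl
theorem maxRun_addNegPairs (l : List Int) : maxRun (addNegPairs l) ≤ (maxRun l + 1) / 2 := by
  have H : ∀ (n : Nat) (l : List Int), l.length ≤ n → maxRun (addNegPairs l) ≤ (maxRun l + 1) / 2 := by
    intro n
    induction n with
    | zero =>
        intro l hl
        have : l = [] := by cases l <;> simp_all
        subst this; rw [addNegPairs_nil, maxRun_nil]
    | succ n ih =>
        intro l hl
        match l with
        | [] => rw [addNegPairs_nil, maxRun_nil]
        | x :: rest =>
          by_cases hx : 0 ≤ x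
          · rw [addNegPairs.eq_def]; simp only [if_pos hx]
            rw [maxRun_cons_nonneg (not_lt.mpr hx), maxRun_cons_nonneg (not_lt.mpr hx)]
            exact ih rest (by simp at hl; omega)
          · match rest with
            | [] =>
                rw [addNegPairs.eq_def]; simp only [if_neg hx]
                rw [addNegPairs_nil, maxRun_cons_neg (by omega : x < 0)]
                simp [negLen, negDrop, maxRun_nil]
            | y :: rest2 =>
              by_cases hy : y < 0
              · rw [addNegPairs.eq_def]; simp only [if_neg hx, if_pos hy]
                rw [maxRun_cons_neg (by omega : x + y < 0), maxRun_cons_neg (by omega : x < 0)]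
                rw [negLen_addNegPairs, negDrop_addNegPairs]
                rw [negLen_cons_neg hy, negDrop_cons_neg hy]
                have h2 := ih (negDrop rest2)
                  (le_trans (negDrop_length_le rest2) (by simp at hl; omega))
                omega
              · rw [addNegPairs.eq_def]; simp only [if_neg hx, if_neg hy]
                have h1 : addNegPairs (y :: rest2) = y :: addNegPairs rest2 := by
                  rw [addNegPairs.eq_def]; simp only [if_pos (not_lt.mp hy)]
                rw [h1, maxRun_cons_neg (by omega : x < 0), maxRun_cons_neg (by omega : x < 0)]
                rw [negLen_cons_nonneg hy, negDrop_cons_nonneg hy, negLen_cons_nonneg hy,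
                    negDrop_cons_nonneg hy]
                rw [maxRun_cons_nonneg hy, maxRun_cons_nonneg hy]
                have h2 := ih rest2 (by simp at hl; omega)
                omega
  exact H l.length l le_rfl

theorem norm_fix (l : List Int) (h : maxRun l ≤ 1) : norm l = l := by
  have H : ∀ (n : Nat) (l : List Int), l.length ≤ n → maxRun l ≤ 1 → norm l = l := by
    intro n
    induction n with
    | zero =>
        intro l hl _
        have : l = [] := by cases l <;> simp_all
        subst this; exact norm_nil
    | succ n ih =>
        intro l hl h
        match l with
        | [] => exact norm_nil
        | x :: rest =>
          by_cases hx : x < 0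
          · rw [maxRun_cons_neg hx] at h
            have h0 : negLen rest = 0 := by omega
            have hd : maxRun (negDrop rest) ≤ 1 := by omega
            rw [negLen_zero_negDrop h0] at hd
            rw [norm_cons_neg hx, negLen_zero_negSum h0, negLen_zero_negDrop h0,
                ih rest (by simp at hl; omega) hd, add_zero]
          · rw [maxRun_cons_nonneg hx] at h
            rw [norm_cons_nonneg hx, ih rest (by simp at hl; omega) h]
  exact H l.length l le_rfl h

theorem iter_addNegPairs (m : Nat) (l : List Int) (h : maxRun l ≤ 2 ^ m) :
    addNegPairs^[m] l = norm l := by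
  induction m generalizing l with
  | zero =>
      simp only [Function.iterate_zero, id_eq]
      exact (norm_fix l (by simpa using h)).symm
  | succ m ih =>
      rw [Function.iterate_succ_apply]
      have hp : (2:Nat) ^ (m + 1) = 2 * 2 ^ m := by ring
      have hh : maxRun (addNegPairs l) ≤ 2 ^ m := by
        have h2 := maxRun_addNegPairs l
        omega
      rw [ih _ hh, norm_addNegPairs]

theorem foldl_iterate (f : List Int → List Int) (n : Nat) (a : List Int) :
    (List.range n).foldl (fun l _ => f l) a = f^[n] a := by
  induction n with
  | zero => simp
  | succ n ih =>
      rw [List.range_succ, List.foldl_append, ih]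
      simp [Function.iterate_succ_apply']

theorem correctA_eq_iter (l : List Int) : correctA l = addNegPairs^[l.length / 2] l := by
  unfold correctA; exact foldl_iterate _ _ _

theorem negLen_le_length (l : List Int) : negLen l ≤ l.length := by
  induction l with
  | nil => simp [negLen]
  | cons x r ih =>
      by_cases hx : x < 0
      · rw [negLen_cons_neg hx]; simp; omega
      · rw [negLen_cons_nonneg hx]; simp

theorem negLen_lt_length (l : List Int) (h : ∃ x ∈ l, 0 ≤ x) : negLen l + 1 ≤ l.length := by
  induction l with
  | nil => simp at h
  | cons x r ih =>
      by_cases hx : x < 0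
      · obtain ⟨w, hw, hw0⟩ := h
        have hwr : w ∈ r := by
          rcases List.mem_cons.mp hw with h1 | h1
          · omega
          · exact h1
        have := ih ⟨w, hwr, hw0⟩
        rw [negLen_cons_neg hx]; simp; omega
      · rw [negLen_cons_nonneg hx]; simp

theorem maxRun_le_length (l : List Int) : maxRun l ≤ l.length := by
  have H : ∀ (n : Nat) (l : List Int), l.length ≤ n → maxRun l ≤ l.length := by
    intro n
    induction n with
    | zero =>
        intro l hl
        have : l = [] := by cases l <;> simp_all
        subst this; rw [maxRun_nil]; exact Nat.zero_le _
    | succ n ih =>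
        intro l hl
        match l with
        | [] => rw [maxRun_nil]; exact Nat.zero_le _
        | x :: rest =>
          by_cases hx : x < 0
          · rw [maxRun_cons_neg hx]
            have h1 := negLen_le_length rest
            have h2 := ih (negDrop rest) (le_trans (negDrop_length_le rest) (by simp at hl; omega))
            have h3 := negDrop_length_le rest
            simp; omega
          · rw [maxRun_cons_nonneg hx]
            have := ih rest (by simp at hl; omega)
            simp; omega
  exact H l.length l le_rfl

theorem maxRun_lt_length (l : List Int) (h : ∃ x ∈ l, 0 ≤ x) : maxRun l + 1 ≤ l.length := by
  match l with
  | [] => simp at h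
  | x :: rest =>
    by_cases hx : x < 0
    · obtain ⟨w, hw, hw0⟩ := h
      have hwr : w ∈ rest := by
        rcases List.mem_cons.mp hw with h1 | h1
        · omega
        · exact h1
      rw [maxRun_cons_neg hx]
      have h1 := negLen_lt_length rest ⟨w, hwr, hw0⟩
      have h2 := le_trans (maxRun_le_length (negDrop rest)) (negDrop_length_le rest)
      simp; omega
    · rw [maxRun_cons_nonneg hx]
      have := maxRun_le_length rest
      simp; omega

theorem le_two_pow_half : ∀ (n : Nat), n ≠ 3 → n ≠ 5 → n ≤ 2 ^ (n / 2) := by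
  intro n
  induction n using Nat.strong_induction_on with
  | _ n ih =>
    intro h3 h5
    by_cases h : n < 8
    · interval_cases n <;> norm_num at *
    · have ih2 := ih (n - 2) (by omega) (by omega) (by omega)
      have hp : 2 ^ (n / 2) = 2 * 2 ^ ((n - 2) / 2) := by
        have he : n / 2 = (n - 2) / 2 + 1 := by omega
        rw [he, pow_succ]; ring
      omega

theorem sub_one_le_two_pow_half (n : Nat) : n - 1 ≤ 2 ^ (n / 2) := by
  by_cases h3 : n = 3
  · subst h3; norm_num
  · by_cases h5 : n = 5
    · subst h5; norm_num
    · have := le_two_pow_half n h3 h5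
      omega
def grpH (T : List Int) : List Int → List (List Int)
  | [] => []
  | x :: r => if x < 0 then T :: grpH [] r else grpH (T ++ [x]) r

def ffinH (T : List Int) : List Int → List Int
  | [] => T
  | x :: r => if x < 0 then ffinH [] r else ffinH (T ++ [x]) r

def smsH : List Int → List Int
  | [] => []
  | x :: r => if x < 0 then x :: smsH r else smsH r

def outB (st : List (List Int) × List Int × List Int × Option Int) :
    List (List Int) × List Int :=
  (st.1, match st.2.2.2 with | some v => st.2.1 ++ [v] | none => st.2.1)

def dropStep (p : List (List Int) × List Int) : List (List Int) × List Int :=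
  match p.1 with
  | [] :: gs' => (gs', p.2.drop 1)
  | _ => p

def rotB (s : List Int) : List Int :=
  match s.getLast? with
  | some last => if 0 < last then s.drop (s.length - countNonnegB s.reverse) ++ s else s
  | none => s

theorem negSum_nonpos (l : List Int) : negSum l ≤ 0 := by
  induction l with
  | nil => simp [negSum]
  | cons x r ih =>
      by_cases hx : x < 0
      · rw [negSum_cons_neg hx]; omega
      · rw [negSum_cons_nonneg hx]

theorem foldA_char (m : List Int) (S : List (List Int)) (T G : List Int) :
    m.foldl partStepA (S, T, G) = (S ++ grpH T m, ffinH T m, G ++ smsH m) := by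
  induction m generalizing S T G with
  | nil => simp [grpH, ffinH, smsH]
  | cons i r ih =>
      rw [List.foldl_cons]
      by_cases hi : i < 0
      · have hstep : partStepA (S, T, G) i = (S ++ [T], [], G ++ [i]) := by
          simp [partStepA, hi]
        rw [hstep, ih]
        simp [grpH, ffinH, smsH, hi]
      · have hstep : partStepA (S, T, G) i = (S, T ++ [i], G) := by
          simp [partStepA, hi]
        rw [hstep, ih]
        simp [grpH, ffinH, smsH, hi]

theorem foldB_char (l : List Int) :
    (∀ (S : List (List Int)) (Ss T : List Int),
      outB (l.foldl stepB (S, Ss, T, none)) = (S ++ grpH T (norm l), Ss ++ smsH (norm l))) ∧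
    (∀ (S : List (List Int)) (Ss : List Int) (v : Int),
      outB (l.foldl stepB (S, Ss, [], some v)) =
        (S ++ grpH [] (norm (negDrop l)),
         Ss ++ (v + negSum l) :: smsH (norm (negDrop l)))) := by
  induction l with
  | nil =>
      constructor
      · intro S Ss T; simp [outB, norm_nil, grpH, smsH]
      · intro S Ss v
        simp [outB, norm_nil, grpH, smsH, negDrop, negSum]
  | cons x r ih =>
      obtain ⟨ihN, ihR⟩ := ih
      constructor
      · intro S Ss T
        rw [List.foldl_cons]
        by_cases hx : x < 0
        · have hstep : stepB (S, Ss, T, none) x = (S ++ [T], Ss, [], some x) := by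
            simp [stepB, hx]
          rw [hstep, ihR (S ++ [T]) Ss x, norm_cons_neg hx]
          have hneg : x + negSum r < 0 := by have := negSum_nonpos r; omega
          simp [grpH, smsH, hneg]
        · have hstep : stepB (S, Ss, T, none) x = (S, Ss, T ++ [x], none) := by
            simp [stepB, hx]
          rw [hstep, ihN S Ss (T ++ [x]), norm_cons_nonneg hx]
          simp [grpH, smsH, hx]
      · intro S Ss v
        rw [List.foldl_cons]
        by_cases hx : x < 0
        · have hstep : stepB (S, Ss, [], some v) x = (S, Ss, [], some (v + x)) := by
            simp [stepB, hx]
          rw [hstep, ihR S Ss (v + x), negDrop_cons_neg hx, negSum_cons_neg hx]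
          rw [add_assoc]
        · have hstep : stepB (S, Ss, [], some v) x = (S, Ss ++ [v], [x], none) := by
            simp [stepB, hx]
          rw [hstep, ihN S (Ss ++ [v]) [x], negDrop_cons_nonneg hx, negSum_cons_nonneg hx,
              norm_cons_nonneg hx]
          simp [grpH, smsH, hx]

theorem takeNonnegA_eq_takeWhile (l : List Int) :
    takeNonnegA l = l.takeWhile (fun x => decide (0 ≤ x)) := by
  induction l with
  | nil => simp [takeNonnegA]
  | cons x r ih =>
      by_cases hx : x < 0
      · simp [takeNonnegA, hx, show ¬ (0:Int) ≤ x by omega]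
      · simp [takeNonnegA, hx, show (0:Int) ≤ x by omega, ih]

theorem countNonnegB_eq_length (l : List Int) : countNonnegB l = (takeNonnegA l).length := by
  induction l with
  | nil => simp [countNonnegB, takeNonnegA]
  | cons x r ih =>
      by_cases hx : x < 0
      · simp [countNonnegB, takeNonnegA, hx]
      · simp [countNonnegB, takeNonnegA, hx, ih]

theorem rot_eq (s : List Int) :
    (takeNonnegA s.reverse).reverse = s.drop (s.length - countNonnegB s.reverse) := by
  rw [countNonnegB_eq_length, takeNonnegA_eq_takeWhile]
  set p : Int → Bool := fun x => decide (0 ≤ x) with hp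
  set a : List Int := (s.reverse.dropWhile p).reverse with ha
  set b : List Int := (s.reverse.takeWhile p).reverse with hb
  have hs : s = a ++ b := by
    rw [ha, hb, ← List.reverse_append, List.takeWhile_append_dropWhile, List.reverse_reverse]
  have hlen : s.length - (s.reverse.takeWhile p).length = a.length := by
    have h1 : (s.reverse.takeWhile p).length + (s.reverse.dropWhile p).length = s.length := by
      rw [← List.length_append, List.takeWhile_append_dropWhile, List.length_reverse]
    rw [ha]; simp; omega
  rw [hlen]
  conv_rhs => rw [hs]
  rw [List.drop_left]

theorem dropA_eq_dropStep (G : List (List Int)) (Sm : List Int) :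
    (match PySem.List.pyGet? G 0 with
     | some g => if g = [] then (G.drop 1, Sm.drop 1) else (G, Sm)
     | none => (G, Sm)) = dropStep (G, Sm) := by
  match G with
  | [] => simp [PySem.List.pyGet?_zero, dropStep]
  | g :: G' =>
    rw [PySem.List.pyGet?_zero_cons]
    match g with
    | [] => simp [dropStep]
    | a :: g' => simp [dropStep]

theorem A_char (s : List Int) :
    separate_gs_and_fix_non_gs_targets s =
      dropStep (grpH [] (correctA (rotB s)), smsH (correctA (rotB s))) := by
  rcases hL : s.getLast? with _ | last
  · have hs : s = [] := List.getLast?_eq_none_iff.mp hL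
    subst hs
    decide
  · by_cases hpos : 0 < last
    · simp only [separate_gs_and_fix_non_gs_targets, rotB, PySem.List.pyGet?_neg_one, hL,
        if_pos hpos, rot_eq s]
      rw [foldA_char]
      simp only [List.nil_append]
      exact dropA_eq_dropStep _ _
    · simp only [separate_gs_and_fix_non_gs_targets, rotB, PySem.List.pyGet?_neg_one, hL,
        if_neg hpos]
      rw [foldA_char]
      simp only [List.nil_append]
      exact dropA_eq_dropStep _ _

theorem B_char (s : List Int) :
    separate_gs_and_fix_non_gs_targets_alt s =
      dropStep (grpH [] (norm (rotB s)), smsH (norm (rotB s))) := by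
  rcases hL : s.getLast? with _ | last
  · have hs : s = [] := List.getLast?_eq_none_iff.mp hL
    subst hs
    rw [show rotB [] = [] from rfl, norm_nil]
    decide
  · by_cases hpos : 0 < last
    · simp only [separate_gs_and_fix_non_gs_targets_alt, rotB, PySem.List.pyGet?_neg_one, hL,
        if_pos hpos]
      have h := (foldB_char (s.drop (s.length - countNonnegB s.reverse) ++ s)).1 [] [] []
      simp only [List.nil_append] at h
      exact Eq.trans (dropA_eq_dropStep _ _) (congrArg dropStep h)
    · simp only [separate_gs_and_fix_non_gs_targets_alt, rotB, PySem.List.pyGet?_neg_one, hL,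
        if_neg hpos]
      have h := (foldB_char s).1 [] [] []
      simp only [List.nil_append] at h
      exact Eq.trans (dropA_eq_dropStep _ _) (congrArg dropStep h)

theorem core_eq (s : List Int) (hD : ¬ D_separate_gs_and_fix_non_gs_targets s) :
    separate_gs_and_fix_non_gs_targets s = separate_gs_and_fix_non_gs_targets_alt s := by
  rw [A_char, B_char]
  suffices hc : correctA (rotB s) = norm (rotB s) by rw [hc]
  have hbound : maxRun (rotB s) ≤ 2 ^ ((rotB s).length / 2) := by
    rcases hL : s.getLast? with _ | last
    · have hs : s = [] := List.getLast?_eq_none_iff.mp hL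
      subst hs
      simp [rotB, maxRun_nil]
    · by_cases hpos : 0 < last
      · have hmem_s : last ∈ s := by
          obtain ⟨l', rfl⟩ := List.getLast?_eq_some_iff.mp hL
          simp
        have ht : rotB s = s.drop (s.length - countNonnegB s.reverse) ++ s := by
          simp only [rotB, hL, if_pos hpos]
        rw [ht]
        have hmem : ∃ x ∈ s.drop (s.length - countNonnegB s.reverse) ++ s, (0:Int) ≤ x :=
          ⟨last, List.mem_append_right _ hmem_s, by omega⟩
        have h1 := maxRun_lt_length _ hmem
        have h2 := sub_one_le_two_pow_half (s.drop (s.length - countNonnegB s.reverse) ++ s).length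
        omega
      · have ht : rotB s = s := by simp only [rotB, hL, if_neg hpos]
        rw [ht]
        by_cases hm : ∃ x ∈ s, (0:Int) ≤ x
        · have h1 := maxRun_lt_length s hm
          have h2 := sub_one_le_two_pow_half s.length
          omega
        · push_neg at hm
          have h35 : s.length ≠ 3 ∧ s.length ≠ 5 := by
            by_contra hc2
            apply hD
            exact ⟨by omega, fun x hx => hm x hx⟩
          exact le_trans (maxRun_le_length s) (le_two_pow_half _ h35.1 h35.2)
  rw [correctA_eq_iter]
  exact iter_addNegPairs _ _ hbound

theorem tight_eq (s : List Int) (hDs : D_separate_gs_and_fix_non_gs_targets s) :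
    separate_gs_and_fix_non_gs_targets s ≠ separate_gs_and_fix_non_gs_targets_alt s := by
  obtain ⟨h35, hall⟩ := hDs
  have hne : s ≠ [] := by intro h; subst h; simp at h35
  obtain ⟨last, hL⟩ : ∃ l, s.getLast? = some l := by
    cases hq : s.getLast? with
    | none => exact absurd (List.getLast?_eq_none_iff.mp hq) hne
    | some l => exact ⟨l, rfl⟩
  have hlast : last < 0 := by
    apply hall
    obtain ⟨l', rfl⟩ := List.getLast?_eq_some_iff.mp hL
    simp
  have hrot : rotB s = s := by simp only [rotB, hL, if_neg (by omega : ¬ 0 < last)]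
  rw [A_char, B_char, hrot]
  rcases h35 with h3 | h5
  · rcases s with _ | ⟨a, _ | ⟨b, _ | ⟨c, t⟩⟩⟩ <;> simp at h3
    have ht : t = [] := by simpa using h3
    subst ht
    have ha : a < 0 := hall a (by simp)
    have hb : b < 0 := hall b (by simp)
    have hc : c < 0 := hall c (by simp)
    have hA : correctA [a, b, c] = [a + b, c] := by
      rw [correctA_eq_iter]
      have hl : ([a, b, c] : List Int).length / 2 = 1 := by simp
      rw [hl, Function.iterate_one]
      rw [addNegPairs_cons2_neg (by omega) hb, addNegPairs_single (by omega)]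
    have hN : norm [a, b, c] = [a + b + c] := by
      rw [norm_cons_neg ha, negSum_cons_neg hb, negSum_cons_neg hc,
          negDrop_cons_neg hb, negDrop_cons_neg hc]
      simp [negDrop, negSum, norm_nil]
      ring
    rw [hA, hN]
    simp [grpH, smsH, dropStep, show a + b < 0 by omega, hc, show a + b + c < 0 by omega]
  · rcases s with _ | ⟨a, _ | ⟨b, _ | ⟨c, _ | ⟨d, _ | ⟨e, t⟩⟩⟩⟩⟩ <;> simp at h5
    have ht : t = [] := by simpa using h5
    subst ht
    have ha : a < 0 := hall a (by simp)
    have hb : b < 0 := hall b (by simp)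
    have hc : c < 0 := hall c (by simp)
    have hd : d < 0 := hall d (by simp)
    have he : e < 0 := hall e (by simp)
    have hA : correctA [a, b, c, d, e] = [a + b + (c + d), e] := by
      rw [correctA_eq_iter]
      have hl : ([a, b, c, d, e] : List Int).length / 2 = 2 := by simp
      rw [hl, show (2 : Nat) = 1 + 1 from rfl, Function.iterate_add_apply, Function.iterate_one]
      rw [addNegPairs_cons2_neg (by omega) hb, addNegPairs_cons2_neg (by omega) hd,
          addNegPairs_single (by omega)]
      rw [addNegPairs_cons2_neg (by omega) (by omega : c + d < 0), addNegPairs_single (by omega)]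
    have hN : norm [a, b, c, d, e] = [a + b + c + d + e] := by
      rw [norm_cons_neg ha, negSum_cons_neg hb, negSum_cons_neg hc, negSum_cons_neg hd,
          negSum_cons_neg he, negDrop_cons_neg hb, negDrop_cons_neg hc, negDrop_cons_neg hd,
          negDrop_cons_neg he]
      simp [negDrop, negSum, norm_nil]
      ring
    rw [hA, hN]
    simp [grpH, smsH, dropStep, show a + b + (c + d) < 0 by omega, he,
      show a + b + c + d + e < 0 by omega]

-- ===== VERDICT =====
theorem separate_gs_and_fix_non_gs_targets_spec :
    Claim_unchanged_separate_gs_and_fix_non_gs_targets := by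
  intro s _ _ hD
  exact core_eq s hD

theorem separate_gs_and_fix_non_gs_targets_changed :
    Claim_changed_separate_gs_and_fix_non_gs_targets := by
  unfold Claim_changed_separate_gs_and_fix_non_gs_targets; decide

theorem separate_gs_and_fix_non_gs_targets_tight :
    Claim_exact_separate_gs_and_fix_non_gs_targets := by
  intro s _ _ hD
  exact tight_eq s hD
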